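-- pv_equiv track=rewrite | github.com/kongukjae/KDT-2-Project-A-6 | dataCrawling/changeJsonData.py | dateFrom
-- ===== SOURCE A (Python) =====
-- def dateFrom(value):
--     result = ''
--     for i in value:
--         if i.isdigit():
--             result += i
--         if len(result) == 4:
--             result += '-'
--         if len(result) == 7:
--             result += '-'
--         if len(result) == 10:
--             break
--     return result
-- ===== SOURCE B (Python) =====
-- def dateFrom(value):
--     ds = ''.join(c for c in value if c.isdigit())[:8]
--     out = ds[:4]
--     if len(ds) >= 4:
--         out += '-'
--     out += ds[4:6]
--     if len(ds) >= 6: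
--         out += '-'
--     return out + ds[6:8]
-- ===== Notes on version B (the rewrite author's own statement) =====
-- stated objective: simpler
-- what changed: Replaces the per-character running-length state machine (append, then re-check length 4/7/10 each iteration, break at 10) with a single digit-filter capped at 8 followed by direct slice assembly with two conditional dashes.
import Mathlib
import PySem

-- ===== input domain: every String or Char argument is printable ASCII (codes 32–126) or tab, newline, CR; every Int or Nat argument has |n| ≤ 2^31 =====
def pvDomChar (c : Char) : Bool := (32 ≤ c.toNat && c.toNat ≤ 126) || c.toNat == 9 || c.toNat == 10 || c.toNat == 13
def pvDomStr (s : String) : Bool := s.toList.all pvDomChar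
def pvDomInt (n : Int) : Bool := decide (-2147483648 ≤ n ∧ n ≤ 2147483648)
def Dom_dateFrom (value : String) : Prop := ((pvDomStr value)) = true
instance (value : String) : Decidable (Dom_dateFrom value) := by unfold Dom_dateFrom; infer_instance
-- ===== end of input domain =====

-- B replaces A's per-character running-length state machine by one digit filter capped
-- at 8 and direct slice assembly (objective: simpler); same behaviour, no side effects.

-- ===== PORT A =====
-- the for-loop with its in-place length checks and break, as structural recursion;
-- i.isdigit() on a single char → PySem.Chars.isdigit (exact on ASCII)
def dateFromLoop : List Char → List Char → List Char
  | [], result => result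
  | i :: rest, result =>
    let result := if PySem.Chars.isdigit i then result ++ [i] else result
    let result := if result.length = 4 then result ++ ['-'] else result
    let result := if result.length = 7 then result ++ ['-'] else result
    if result.length = 10 then result else dateFromLoop rest result

def dateFrom (value : String) : String :=
  String.mk (dateFromLoop value.toList [])

-- ===== PORT B =====
-- ds = digits of value, first 8; then slice assembly with two conditional dashes
def dateFrom_alt (value : String) : String :=
  let ds := (value.toList.filter PySem.Chars.isdigit).take 8
  let out := ds.take 4
  let out := if 4 ≤ ds.length then out ++ ['-'] else out
  let out := out ++ ((ds.drop 4).take 2)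
  let out := if 6 ≤ ds.length then out ++ ['-'] else out
  String.mk (out ++ ((ds.drop 6).take 2))

-- ===== PRECONDITION & SPEC =====
def Spec_dateFrom (value : String) (out : String) : Prop := out = dateFrom_alt value
instance (value : String) (out : String) : Decidable (Spec_dateFrom value out) := by unfold Spec_dateFrom; infer_instance

-- ===== CLAIM (what is proved, stated in full; the proofs are below) =====
def Claim_equal_dateFrom : Prop := ∀ (value : String), Dom_dateFrom value → Spec_dateFrom value (dateFrom value)

-- ===== LEMMAS AND PROOFS =====

-- B's slice assembly, as one flat append chain (proof-side view of dateFrom_alt)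
def asm (ds : List Char) : List Char :=
  ds.take 4 ++ (if 4 ≤ ds.length then ['-'] else []) ++ (ds.drop 4).take 2
    ++ (if 6 ≤ ds.length then ['-'] else []) ++ (ds.drop 6).take 2

theorem alt_eq_asm (value : String) :
    dateFrom_alt value = String.mk (asm ((value.toList.filter PySem.Chars.isdigit).take 8)) := by
  show _ = _
  simp only [dateFrom_alt, asm]
  split_ifs <;> simp

theorem asm_length (ds : List Char) (h : ds.length ≤ 8) :
    (asm ds).length =
      ds.length + (if 4 ≤ ds.length then 1 else 0) + (if 6 ≤ ds.length then 1 else 0) := by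
  unfold asm
  split_ifs <;> simp <;> omega

theorem asm_snoc (ds : List Char) (c : Char) (h : ds.length < 8) :
    asm (ds ++ [c]) = asm ds ++ (if ds.length = 3 ∨ ds.length = 5 then [c, '-'] else [c]) := by
  unfold asm
  interval_cases hl : ds.length <;>
    simp [List.take_append, List.drop_append, hl, List.take_of_length_le,
      List.drop_eq_nil_of_le]

theorem loop_asm (cs : List Char) : ∀ (ds : List Char), ds.length < 8 →
    dateFromLoop cs (asm ds) = asm ((ds ++ cs.filter PySem.Chars.isdigit).take 8) := by
  induction cs with
  | nil =>
      intro ds h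
      simp [dateFromLoop, List.take_of_length_le (Nat.le_of_lt h)]
  | cons c cs ih =>
      intro ds h
      have hlen := asm_length ds (Nat.le_of_lt h)
      have hlen2 : ((asm ds).length = ds.length ∧ ds.length < 4) ∨
          ((asm ds).length = ds.length + 1 ∧ 4 ≤ ds.length ∧ ds.length < 6) ∨
          ((asm ds).length = ds.length + 2 ∧ 6 ≤ ds.length) := by
        split_ifs at hlen <;> omega
      by_cases hd : PySem.Chars.isdigit c = true
      · have hsnoc := asm_snoc ds c h
        have ha : (asm ds ++ [c]).length = (asm ds).length + 1 := by simp
        have hlen'2 : ((asm (ds ++ [c])).length = ds.length + 1 ∧ ds.length + 1 < 4) ∨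
            ((asm (ds ++ [c])).length = ds.length + 2 ∧ 4 ≤ ds.length + 1 ∧ ds.length + 1 < 6) ∨
            ((asm (ds ++ [c])).length = ds.length + 3 ∧ 6 ≤ ds.length + 1) := by
          have h' := asm_length (ds ++ [c]) (by simp; omega)
          simp only [List.length_append, List.length_cons, List.length_nil] at h'
          split_ifs at h' <;> omega
        simp only [dateFromLoop, hd, if_true, List.filter_cons_of_pos hd]
        have key : (if (if (asm ds ++ [c]).length = 4 then asm ds ++ [c] ++ ['-']
                        else asm ds ++ [c]).length = 7
                    then (if (asm ds ++ [c]).length = 4 then asm ds ++ [c] ++ ['-']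
                          else asm ds ++ [c]) ++ ['-']
                    else (if (asm ds ++ [c]).length = 4 then asm ds ++ [c] ++ ['-']
                          else asm ds ++ [c])) = asm (ds ++ [c]) := by
          by_cases h3 : ds.length = 3
          · rw [if_pos (show (asm ds ++ [c]).length = 4 by omega)]
            rw [if_neg (show ¬ ((asm ds ++ [c] ++ ['-']).length = 7) by
                  simp only [List.length_append, List.length_cons, List.length_nil]; omega)]
            rw [hsnoc, if_pos (Or.inl h3)]
            simp
          · by_cases h5 : ds.length = 5
            · rw [if_neg (show ¬ ((asm ds ++ [c]).length = 4) by omega)]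
              rw [if_pos (show (asm ds ++ [c]).length = 7 by omega)]
              rw [hsnoc, if_pos (Or.inr h5)]
              simp
            · rw [if_neg (show ¬ ((asm ds ++ [c]).length = 4) by omega)]
              rw [if_neg (show ¬ ((asm ds ++ [c]).length = 7) by omega)]
              rw [hsnoc, if_neg (show ¬ (ds.length = 3 ∨ ds.length = 5) by omega)]
        rw [key]
        by_cases h7 : ds.length = 7
        · -- 8th digit: the running length hits 10 and the loop breaks
          rw [if_pos (show (asm (ds ++ [c])).length = 10 by omega)]
          rw [List.take_append, List.take_of_length_le (by omega), h7]
          norm_num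
        · rw [if_neg (show ¬ ((asm (ds ++ [c])).length = 10) by omega)]
          rw [ih (ds ++ [c]) (by simp; omega)]
          rw [List.append_assoc]
          rfl
      · -- non-digit: the state is unchanged, and its length is never 4, 7 or 10
        simp only [dateFromLoop, hd, if_false, Bool.false_eq_true,
          List.filter_cons_of_neg (by simpa using hd)]
        rw [if_neg (show ¬ ((asm ds).length = 4) by omega),
            if_neg (show ¬ ((asm ds).length = 7) by omega),
            if_neg (show ¬ ((asm ds).length = 10) by omega)]
        exact ih ds h

-- ===== VERDICT (by name: the statement is the Claim_ definition above) =====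
theorem dateFrom_spec : Claim_equal_dateFrom := by
  intro value _
  unfold Spec_dateFrom dateFrom
  rw [alt_eq_asm]
  have h0 : asm [] = ([] : List Char) := rfl
  have hmain := loop_asm value.toList [] (by simp)
  rw [h0, List.nil_append] at hmain
  exact congrArg String.mk hmain
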